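-- pv_equiv track=rewrite | github.com/sflorin123/json-storage | gerrymandering.py | allDistricting
-- ===== SOURCE A (Python) =====
-- def allDistricting(maxi):
--   dis = []
--   maxiList = list(maxi.values())
--   for i in range(max(maxiList)+1):
--     dis.append([])
--   for j in list(maxi.keys()):
--     if maxi[j] in range(len(dis)):
--       d=dis[maxi[j]]
--       d.append(j)
--       dis[maxi[j]]=d
--   return dis
-- ===== SOURCE B (Python) =====
-- def allDistricting(maxi):
--   n = max(maxi.values()) + 1
--   items = list(maxi.items())
--   return [[k for k, v in items if v == i] for i in range(n)]
-- ===== Notes on version B (the rewrite author's own statement) =====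
-- stated objective: idiomatic
-- what changed: Replaced A's scatter-into-mutable-buckets loop (preallocate empty lists, then index-assign each key into its bucket) by a nested comprehension that rescans the items once per bucket index, collecting keys whose value equals that index.
import Mathlib
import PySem

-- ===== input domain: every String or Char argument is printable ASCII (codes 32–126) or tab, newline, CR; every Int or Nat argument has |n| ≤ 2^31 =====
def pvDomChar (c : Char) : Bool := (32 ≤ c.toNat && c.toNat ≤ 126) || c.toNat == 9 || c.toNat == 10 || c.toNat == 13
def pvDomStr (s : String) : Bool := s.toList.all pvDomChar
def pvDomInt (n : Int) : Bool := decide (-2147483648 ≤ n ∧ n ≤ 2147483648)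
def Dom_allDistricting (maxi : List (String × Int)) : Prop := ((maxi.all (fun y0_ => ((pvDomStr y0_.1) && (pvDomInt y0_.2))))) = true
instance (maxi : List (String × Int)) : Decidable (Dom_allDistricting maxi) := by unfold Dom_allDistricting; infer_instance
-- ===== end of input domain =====

-- B groups dict keys by value with a nested comprehension (one rescan of the items per
-- bucket index) instead of A's preallocate-and-index-assign scatter loop.

-- ===== PORT A =====
def allDistricting (maxi : List (String × Int)) : List (List String) :=
  let d := PySem.Dict.ofList maxi
  let maxiList := d.values
  -- max(maxiList): ValueError on an empty dict, excluded by Pre_; the .getD 0 is never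
  -- reached under Pre_.
  let dis : List (List String) :=
    (PySem.List.pyRange 0 ((PySem.List.max? maxiList (fun x => x)).getD 0 + 1) 1).foldl
      (fun acc _ => acc ++ [([] : List String)]) []
  d.keys.foldl (fun dis j =>
    let v := d.getD j 0
    if 0 ≤ v ∧ v < (dis.length : Int) then
      PySem.List.pySetD dis v (PySem.List.pyGetD dis v [] ++ [j])
    else dis) dis

-- ===== PORT B =====
def allDistricting_alt (maxi : List (String × Int)) : List (List String) :=
  let d := PySem.Dict.ofList maxi
  -- max(d.values): ValueError on an empty dict, excluded by Pre_
  let n := (PySem.List.max? d.values (fun x => x)).getD 0 + 1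
  let items := d.items
  (PySem.List.pyRange 0 n 1).map (fun i => (items.filter (fun kv => kv.2 == i)).map (·.1))

-- ===== PRECONDITION & SPEC =====
-- Pre_ excludes only the empty dict, on which both A and B raise ValueError (max of an empty sequence).
def Pre_allDistricting (maxi : List (String × Int)) : Prop := maxi ≠ []
instance (maxi : List (String × Int)) : Decidable (Pre_allDistricting maxi) := by unfold Pre_allDistricting; infer_instance
def pvWitness_allDistricting : (List (String × Int)) := [("a", 2), ("b", 0), ("c", 2)]

def Spec_allDistricting (maxi : List (String × Int)) (out : List (List String)) : Prop := out = allDistricting_alt maxi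
instance (maxi : List (String × Int)) (out : List (List String)) : Decidable (Spec_allDistricting maxi out) := by unfold Spec_allDistricting; infer_instance

-- ===== CLAIM (what is proved, stated in full; the proofs are below) =====
def Claim_equal_allDistricting : Prop := ∀ (maxi : List (String × Int)), Dom_allDistricting maxi → Pre_allDistricting maxi → Spec_allDistricting maxi (allDistricting maxi)

-- ===== LEMMAS AND PROOFS =====

-- one step of A's scatter loop
def pvStep (dis : List (List String)) (kv : String × Int) : List (List String) :=
  if 0 ≤ kv.2 ∧ kv.2 < (dis.length : Int) then
    PySem.List.pySetD dis kv.2 (PySem.List.pyGetD dis kv.2 [] ++ [kv.1])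
  else dis

-- B's bucket table after the pairs ps have been processed
def pvTarget (n : Int) (ps : List (String × Int)) : List (List String) :=
  (PySem.List.pyRange 0 n 1).map (fun i => (ps.filter (fun kv => kv.2 == i)).map (·.1))

lemma pvTarget_length (n : Int) (ps : List (String × Int)) :
    (pvTarget n ps).length = n.toNat := by
  simp [pvTarget, PySem.List.length_pyRange_one]

lemma pvScatter_eq (n : Int) (ps : List (String × Int)) :
    ps.foldl pvStep (pvTarget n []) = pvTarget n ps := by
  induction ps using List.reverseRecOn with
  | nil => rfl
  | append_singleton qs kv ih =>
    rw [List.foldl_append, List.foldl_cons, List.foldl_nil, ih]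
    obtain ⟨k, v⟩ := kv
    unfold pvStep
    by_cases h : 0 ≤ v ∧ v < ((pvTarget n qs).length : Int)
    · rw [if_pos h]
      have hvlen : v < (n.toNat : Int) := by rw [pvTarget_length] at h; exact h.2
      have hv0 : 0 ≤ v := h.1
      have hvn : v < n := lt_of_lt_of_le hvlen (by omega)
      have hget : PySem.List.pyGetD (pvTarget n qs) v [] =
          (qs.filter (fun kv => kv.2 == v)).map (·.1) := by
        unfold pvTarget
        exact PySem.List.pyGetD_map_pyRange_of_nonneg _ n v _ hv0 (by simpa using hvn)
      rw [hget, PySem.List.pySetD_of_nonneg _ _ hv0]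
      apply List.ext_getElem
      · simp [pvTarget_length]
      · intro j hj1 hj2
        rw [List.getElem_set]
        have hjn : j < n.toNat := by simpa [pvTarget_length] using hj2
        have hjrange : j < (PySem.List.pyRange 0 n 1).length := by
          simpa [PySem.List.length_pyRange_one] using hjn
        by_cases hjv : v.toNat = j
        · rw [if_pos hjv]
          have hji : (j : Int) = v := by omega
          simp only [pvTarget, List.getElem_map, PySem.List.getElem_pyRange_one,
            zero_add, hji, List.filter_append, List.map_append]
          simp
        · rw [if_neg hjv]
          have hji : (v == (j : Int)) = false := by simp; omega
          simp only [pvTarget, List.getElem_map, PySem.List.getElem_pyRange_one,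
            zero_add, List.filter_append, List.map_append]
          simp [List.filter, hji]
    · rw [if_neg h]
      -- v is outside [0, n): no bucket changes
      unfold pvTarget
      apply List.map_congr_left
      intro i hi
      rw [PySem.List.mem_pyRange_one] at hi
      have hvlen : ((pvTarget n qs).length : Int) = (n.toNat : Int) := by
        rw [pvTarget_length]
      rw [hvlen] at h
      have hvi : (v == i) = false := by simp; omega
      simp [List.filter, hvi]

-- A's key loop with per-key lookup is the fold of pvStep over the items
lemma pvKeys_fold_eq_items_fold (d : PySem.Dict String Int) (hnd : d.keys.Nodup) (init : List (List String)) :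
    d.keys.foldl (fun dis j =>
      let v := d.getD j 0
      if 0 ≤ v ∧ v < (dis.length : Int) then
        PySem.List.pySetD dis v (PySem.List.pyGetD dis v [] ++ [j])
      else dis) init = d.items.foldl pvStep init := by
  rw [PySem.Dict.items_eq_map_keys d hnd 0, List.foldl_map]
  rfl

-- ===== VERDICT (by name: the statement is the Claim_ definition above) =====
theorem allDistricting_spec : Claim_equal_allDistricting := by
  intro maxi _ _
  unfold Spec_allDistricting allDistricting allDistricting_alt
  simp only []
  rw [pvKeys_fold_eq_items_fold _ (PySem.Dict.nodup_keys_ofList maxi)]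
  have h0 : (PySem.List.pyRange 0 ((PySem.List.max? (PySem.Dict.ofList maxi).values (fun x => x)).getD 0 + 1) 1).foldl
      (fun acc _ => acc ++ [([] : List String)]) [] =
      pvTarget ((PySem.List.max? (PySem.Dict.ofList maxi).values (fun x => x)).getD 0 + 1) [] := by
    rw [PySem.List.foldl_append_singleton_eq_map]
    simp [pvTarget]
  rw [h0, pvScatter_eq]
  rfl
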